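-- pv_equiv track=rewrite | github.com/Ingemisco/AdventOfCode2020 | aoc20.py | calc
-- ===== SOURCE A (Python) =====
-- def calc(tile, face):
--     n = len(tile)
--     if face == 0: # top
--         fct = lambda x: (0, x)
--     elif face == 2: #bottom
--         fct = lambda x: (n - 1, n - 1 - x)
--     elif face == 1: # right
--         fct = lambda x: (n - 1 - x, n - 1)
--     else: # 3 left
--         fct = lambda x: (x, 0)
--
--     val0 = 0
--     val1 = 0
--     for i in range(n):
--         x, y = fct(i)
--         if tile[x][y] == '#':
--             val0 += 2**i
--             val1 += 2**(n - 1 - i)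
--     if val0 > val1:
--         return val0, False
--     else:
--         return val1, True
-- ===== SOURCE B (Python) =====
-- def calc(tile, face):
--     n = len(tile)
--     if face == 0:  # top
--         cells = [tile[0][x] for x in range(n)]
--     elif face == 2:  # bottom
--         cells = [tile[n - 1][n - 1 - x] for x in range(n)]
--     elif face == 1:  # right
--         cells = [tile[n - 1 - x][n - 1] for x in range(n)]
--     else:  # 3 left
--         cells = [tile[x][0] for x in range(n)]
--     bits = ''.join('1' if c == '#' else '0' for c in cells)
--     val1 = int(bits, 2) if bits else 0
--     val0 = int(bits[::-1], 2) if bits else 0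
--     return (val0, False) if val0 > val1 else (val1, True)
-- ===== Notes on version B (the rewrite author's own statement) =====
-- stated objective: simpler
-- what changed: B builds the edge once as a bit string and decodes it twice with int(bits, 2) (forward and reversed), replacing A's single loop that accumulates two power-of-two sums per cell.
import Mathlib
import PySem

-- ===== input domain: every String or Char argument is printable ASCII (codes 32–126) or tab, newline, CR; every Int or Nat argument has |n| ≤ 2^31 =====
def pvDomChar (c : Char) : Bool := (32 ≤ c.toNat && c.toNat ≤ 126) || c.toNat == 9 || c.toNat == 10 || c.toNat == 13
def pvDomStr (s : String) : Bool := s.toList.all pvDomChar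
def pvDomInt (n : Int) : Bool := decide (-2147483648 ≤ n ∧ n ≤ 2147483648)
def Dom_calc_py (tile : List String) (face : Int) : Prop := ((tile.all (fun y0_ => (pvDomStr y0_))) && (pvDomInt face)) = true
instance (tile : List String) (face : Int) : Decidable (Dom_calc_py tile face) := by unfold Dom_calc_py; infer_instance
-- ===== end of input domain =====

-- B builds the edge as a bit list and reads it twice with a Horner fold (int(bits,2)),
-- instead of A's single loop accumulating two power-of-two sums; objective: simpler decomposition.

-- shared cell access tile[x][y] (both Pythons index the same way; total via default, exact under Pre_)
def pvCell (tile : List String) (x y : Int) : Char :=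
  (PySem.Str.pyGet? (PySem.List.pyGetD tile x "") y).getD ' '

-- ===== PORT A =====
def calc_py (tile : List String) (face : Int) : Int × Bool :=
  let n : Int := tile.length
  let fct : Int → Int × Int :=
    if face = 0 then fun x => (0, x)
    else if face = 2 then fun x => (n - 1, n - 1 - x)
    else if face = 1 then fun x => (n - 1 - x, n - 1)
    else fun x => (x, 0)
  let vals : Int × Int :=
    (PySem.List.pyRange 0 n 1).foldl
      (fun (p : Int × Int) i =>
        if pvCell tile (fct i).1 (fct i).2 = '#'
        then (p.1 + 2 ^ i.toNat, p.2 + 2 ^ (n - 1 - i).toNat)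
        else p)
      (0, 0)
  if vals.1 > vals.2 then (vals.1, false) else (vals.2, true)

-- ===== PORT B =====
-- int(bits, 2) on a 0/1 string = Horner fold over the bit list (0 on the empty string, as Source B guards)
def pvHorner (bs : List Bool) : Int :=
  bs.foldl (fun a b => 2 * a + (if b then 1 else 0)) 0

def calc_py_alt (tile : List String) (face : Int) : Int × Bool :=
  let n : Int := tile.length
  let cells : List Char :=
    if face = 0 then (PySem.List.pyRange 0 n 1).map (fun x => pvCell tile 0 x)
    else if face = 2 then (PySem.List.pyRange 0 n 1).map (fun x => pvCell tile (n - 1) (n - 1 - x))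
    else if face = 1 then (PySem.List.pyRange 0 n 1).map (fun x => pvCell tile (n - 1 - x) (n - 1))
    else (PySem.List.pyRange 0 n 1).map (fun x => pvCell tile x 0)
  let bits : List Bool := cells.map (fun c => c = '#')
  let val1 : Int := pvHorner bits
  let val0 : Int := pvHorner bits.reverse
  if val0 > val1 then (val0, false) else (val1, true)

-- ===== PRECONDITION & SPEC =====
-- Pre_ = exactly the inputs where Python A returns (no IndexError): every edge cell it reads exists.
def Pre_calc_py (tile : List String) (face : Int) : Prop :=
  if face = 0 then tile.length ≤ (tile.getD 0 "").length
  else if face = 2 then tile.length ≤ (tile.getD (tile.length - 1) "").length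
  else if face = 1 then ∀ s ∈ tile, tile.length ≤ s.length
  else ∀ s ∈ tile, 1 ≤ s.length
instance (tile : List String) (face : Int) : Decidable (Pre_calc_py tile face) := by unfold Pre_calc_py; infer_instance
def pvWitness_calc_py : List String × Int := (["#.", ".#"], 0)

def Spec_calc_py (tile : List String) (face : Int) (out : Int × Bool) : Prop := out = calc_py_alt tile face
instance (tile : List String) (face : Int) (out : Int × Bool) : Decidable (Spec_calc_py tile face out) := by unfold Spec_calc_py; infer_instance

-- ===== CLAIM (what is proved, stated in full; the proofs are below) =====
def Claim_equal_calc_py : Prop := ∀ (tile : List String) (face : Int), Dom_calc_py tile face → Pre_calc_py tile face → Spec_calc_py tile face (calc_py tile face)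

-- ===== LEMMAS AND PROOFS =====

def pvS0 (n : Nat) (g : Nat → Bool) : Int :=
  ∑ i ∈ Finset.range n, (if g i then (2:Int) ^ i else 0)

def pvS1 (N n : Nat) (g : Nat → Bool) : Int :=
  ∑ i ∈ Finset.range n, (if g i then (2:Int) ^ (N - 1 - i) else 0)

theorem pvHorner_acc (bs : List Bool) (a : Int) :
    bs.foldl (fun a b => 2 * a + (if b then 1 else 0)) a
      = a * 2 ^ bs.length + pvHorner bs := by
  induction bs generalizing a with
  | nil => simp [pvHorner]
  | cons b l ih =>
    simp only [List.foldl_cons, List.length_cons]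
    rw [ih]
    have h2 : pvHorner (b :: l) = (2 * 0 + if b then 1 else 0) * 2 ^ l.length + pvHorner l := by
      rw [pvHorner, List.foldl_cons, ih]
    rw [h2]
    ring

theorem pvHorner_append_singleton (bs : List Bool) (b : Bool) :
    pvHorner (bs ++ [b]) = 2 * pvHorner bs + (if b then 1 else 0) := by
  simp [pvHorner, List.foldl_append]

theorem pvHorner_eq_S1 (n : Nat) (g : Nat → Bool) :
    pvHorner ((List.range n).map g) = pvS1 n n g := by
  induction n with
  | zero => simp [pvHorner, pvS1]
  | succ n ih =>
    rw [List.range_succ, List.map_append, List.map_singleton, pvHorner_append_singleton, ih]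
    simp only [pvS1, Finset.sum_range_succ]
    rw [Finset.mul_sum]
    have h1 : ∀ i ∈ Finset.range n,
        2 * (if g i then (2:Int) ^ (n - 1 - i) else 0)
          = (if g i then (2:Int) ^ (n + 1 - 1 - i) else 0) := by
      intro i hi
      have hi' := Finset.mem_range.mp hi
      split_ifs
      · rw [← pow_succ']
        congr 1
        omega
      · ring
    rw [Finset.sum_congr rfl h1]
    simp

theorem pvHorner_reverse_eq_S0 (n : Nat) (g : Nat → Bool) :
    pvHorner ((List.range n).map g).reverse = pvS0 n g := by
  induction n with
  | zero => simp [pvHorner, pvS0]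
  | succ n ih =>
    rw [List.range_succ, List.map_append]
    simp only [List.reverse_append, List.map_cons, List.map_nil, List.reverse_cons,
      List.reverse_nil, List.nil_append, List.cons_append]
    rw [pvHorner, List.foldl_cons, pvHorner_acc]
    simp only [List.length_reverse, List.length_map, List.length_range]
    rw [ih]
    simp only [pvS0, Finset.sum_range_succ]
    split_ifs <;> ring

theorem pvFoldA (N : Nat) (g : Nat → Bool) (n : Nat) :
    (List.range n).foldl
      (fun (p : Int × Int) i =>
        if g i then (p.1 + 2 ^ i, p.2 + 2 ^ (N - 1 - i)) else p)
      (0, 0)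
      = (pvS0 n g, pvS1 N n g) := by
  induction n with
  | zero => simp [pvS0, pvS1]
  | succ n ih =>
    rw [List.range_succ, List.foldl_append, ih]
    simp only [List.foldl_cons, List.foldl_nil, pvS0, pvS1, Finset.sum_range_succ]
    split_ifs <;> simp

-- bridge: A's accumulating loop over the edge equals B's two Horner reads, for any index map
theorem pvBridge (tile : List String) (fct : Int → Int × Int) :
    (PySem.List.pyRange 0 (tile.length : Int) 1).foldl
      (fun (p : Int × Int) i =>
        if pvCell tile (fct i).1 (fct i).2 = '#'
        then (p.1 + 2 ^ i.toNat, p.2 + 2 ^ (((tile.length : Int) - 1 - i)).toNat)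
        else p)
      (0, 0)
      = (pvHorner (((PySem.List.pyRange 0 (tile.length : Int) 1).map
            (fun x => pvCell tile (fct x).1 (fct x).2)).map (fun c => decide (c = '#'))).reverse,
         pvHorner (((PySem.List.pyRange 0 (tile.length : Int) 1).map
            (fun x => pvCell tile (fct x).1 (fct x).2)).map (fun c => decide (c = '#')))) := by
  have hrange : PySem.List.pyRange 0 (tile.length : Int) 1
      = (List.range tile.length).map (fun k : Nat => (k : Int)) := by
    rw [PySem.List.pyRange_one]
    have h : (((tile.length : Int)) - 0).toNat = tile.length := by omega
    rw [h]
    exact List.map_congr_left (fun k _ => by omega)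
  rw [hrange, List.foldl_map, List.map_map, List.map_map]
  have hg : (List.range tile.length).map
        (((fun c => decide (c = '#')) ∘ fun x => pvCell tile (fct x).1 (fct x).2) ∘ fun k : Nat => (k : Int))
      = (List.range tile.length).map (fun k : Nat => decide (pvCell tile (fct (k : Int)).1 (fct (k : Int)).2 = '#')) := rfl
  rw [hg]
  have hfun := PySem.List.foldl_congr_mem
    (l := List.range tile.length) (init := ((0 : Int), (0 : Int)))
    (f := fun (p : Int × Int) (k : Nat) =>
      if pvCell tile (fct (k : Int)).1 (fct (k : Int)).2 = '#'
      then (p.1 + 2 ^ ((k : Int)).toNat, p.2 + 2 ^ (((tile.length : Int) - 1 - (k : Int))).toNat)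
      else p)
    (g := fun (p : Int × Int) (k : Nat) =>
      if (fun k : Nat => decide (pvCell tile (fct (k : Int)).1 (fct (k : Int)).2 = '#')) k
      then (p.1 + 2 ^ k, p.2 + 2 ^ (tile.length - 1 - k)) else p)
    (by
      intro p k hk
      have hk' : k < tile.length := List.mem_range.mp hk
      have h1 : ((k : Int)).toNat = k := by omega
      have h2 : (((tile.length : Int) - 1 - (k : Int))).toNat = tile.length - 1 - k := by omega
      by_cases hc : pvCell tile (fct (k : Int)).1 (fct (k : Int)).2 = '#' <;> simp [hc, h1, h2])
  rw [hfun, pvFoldA tile.length, pvHorner_reverse_eq_S0, pvHorner_eq_S1]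

-- ===== VERDICT (by name: the statement is the Claim_ definition above) =====
theorem calc_py_spec : Claim_equal_calc_py := by
  intro tile face _hdom _hpre
  unfold Spec_calc_py calc_py calc_py_alt
  by_cases h0 : face = 0
  · subst h0
    simp only [reduceIte]
    rw [pvBridge tile (fun x => (0, x))]
  · by_cases h2 : face = 2
    · subst h2
      simp only [show ¬((2:Int) = 0) from by norm_num, ite_false, reduceIte]
      rw [pvBridge tile (fun x => ((tile.length : Int) - 1, (tile.length : Int) - 1 - x))]
    · by_cases h1 : face = 1
      · subst h1
        simp only [show ¬((1:Int) = 0) from by norm_num, show ¬((1:Int) = 2) from by norm_num, ite_false, reduceIte]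
        rw [pvBridge tile (fun x => ((tile.length : Int) - 1 - x, (tile.length : Int) - 1))]
      · simp only [h0, h2, h1, ite_false]
        rw [pvBridge tile (fun x => (x, 0))]
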